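-- pv_equiv track=rewrite | github.com/sigurdvaa/adventofcode | 2015/08-Matchsticks.py | encoded_size
-- ===== SOURCE A (Python) =====
-- def encoded_size(string: str):
--     size = 2
--     i = 0
--     while i < len(string):
--         if string[i] == "\\" or string[i] == '"':
--             size += 1
--         size += 1
--         i += 1
--
--     return size
-- ===== SOURCE B (Python) =====
-- def encoded_size(string: str):
--     # closed form: raw length + 2 surrounding quotes + one escape per backslash or quote
--     return len(string) + 2 + string.count("\\") + string.count('"')
-- ===== Notes on version B (the rewrite author's own statement) =====
-- stated objective: simpler
-- what changed: Replaced the index-driven while loop with a character-by-character conditional accumulator by a single closed-form arithmetic expression combining len() and two .count() scans.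
import Mathlib
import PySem

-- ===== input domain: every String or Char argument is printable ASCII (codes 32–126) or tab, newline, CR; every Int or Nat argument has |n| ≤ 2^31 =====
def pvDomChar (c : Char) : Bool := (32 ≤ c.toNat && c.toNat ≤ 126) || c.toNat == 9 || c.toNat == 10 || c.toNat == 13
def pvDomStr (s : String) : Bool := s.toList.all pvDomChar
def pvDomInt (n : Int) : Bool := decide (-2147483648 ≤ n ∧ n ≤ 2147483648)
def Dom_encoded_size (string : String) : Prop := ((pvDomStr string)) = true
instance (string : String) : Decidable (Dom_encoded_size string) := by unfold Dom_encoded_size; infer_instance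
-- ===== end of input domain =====

-- B replaces A's index-driven counting loop by a closed-form expression: len + 2 + count('\\') + count('"').


-- ===== PORT A =====
-- while i < len(string): if string[i] == '\\' or string[i] == '"': size += 1; size += 1; i += 1
def encoded_size (string : String) : Int :=
  (PySem.List.pyRange 0 (PySem.Str.len string) 1).foldl
    (fun size i =>
      let size := if PySem.List.pyGetD string.toList i ' ' = '\\' ∨
                     PySem.List.pyGetD string.toList i ' ' = '"' then size + 1 else size
      size + 1)
    2

-- ===== PORT B =====
def encoded_size_alt (string : String) : Int :=
  (PySem.Str.len string) + 2 + (PySem.Str.count string "\\" : Int) + (PySem.Str.count string "\"" : Int)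

-- ===== PRECONDITION & SPEC =====
def Spec_encoded_size (string : String) (out : Int) : Prop := out = encoded_size_alt string
instance (string : String) (out : Int) : Decidable (Spec_encoded_size string out) := by unfold Spec_encoded_size; infer_instance

-- ===== CLAIM (what is proved, stated in full; the proofs are below) =====
def Claim_equal_encoded_size : Prop := ∀ (string : String), Dom_encoded_size string → Spec_encoded_size string (encoded_size string)

-- ===== LEMMAS AND PROOFS =====

-- PySem.Chars.count with a single-character needle is List.count (fuel-indexed helper first).
theorem pv_go_single (c : Char) : ∀ (l : List Char) (fuel acc : Nat), l.length ≤ fuel →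
    PySem.Chars.count.go [c] fuel l acc = acc + l.count c := by
  intro l
  induction l with
  | nil => intro fuel acc h; cases fuel <;> simp [PySem.Chars.count.go]
  | cons x t ih =>
    intro fuel acc h
    cases fuel with
    | zero => simp at h
    | succ n =>
      simp only [PySem.Chars.count.go, List.isPrefixOf, List.count_cons]
      by_cases hc : c = x
      · subst hc
        simp only [beq_self_eq_true, Bool.and_true, if_true, List.length_cons,
          List.length_nil, List.drop_succ_cons, List.drop_zero]
        rw [ih n (acc+1) (by simpa using h)]
        omega
      · rw [if_neg (by simp [hc]), ih n acc (by simpa using h)]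
        have : ¬ x = c := fun h' => hc h'.symm
        simp [this]

theorem pv_count_single (s : List Char) (c : Char) : PySem.Chars.count s [c] = s.count c := by
  simp [PySem.Chars.count, pv_go_single c s s.length 0 le_rfl]

-- A's loop body, folded over the characters, in closed form.
theorem pv_foldl_closed (l : List Char) : ∀ (a : Int),
    l.foldl (fun size c =>
      (if c = '\\' ∨ c = '"' then size + 1 else size) + 1) a
    = a + l.length + l.count '\\' + l.count '"' := by
  induction l with
  | nil => intro a; simp
  | cons x t ih =>
    intro a
    simp only [List.foldl_cons, List.count_cons, ih, List.length_cons]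
    by_cases h1 : x = '\\'
    · subst h1; simp; omega
    · by_cases h2 : x = '"'
      · subst h2; simp; omega
      · simp [h1, h2]
        omega

-- ===== VERDICT (by name: the statement is the Claim_ definition above) =====
theorem encoded_size_spec : Claim_equal_encoded_size := by
  intro s _
  unfold Spec_encoded_size encoded_size encoded_size_alt
  rw [show PySem.Str.len s = ((s.toList.length : Nat) : Int) by simp [PySem.Str.len_eq]]
  show (PySem.List.pyRange 0 (s.toList.length : Int) 1).foldl
      (fun size i => (if PySem.List.pyGetD s.toList i ' ' = '\\' ∨
                        PySem.List.pyGetD s.toList i ' ' = '"' then size + 1 else size) + 1) 2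
    = (s.toList.length : Int) + 2 + (PySem.Str.count s "\\" : Int) + (PySem.Str.count s "\"" : Int)
  rw [PySem.List.foldl_pyRange_zero_pyGetD' s.toList ' '
    (fun size c => (if c = '\\' ∨ c = '"' then size + 1 else size) + 1) 2]
  rw [pv_foldl_closed s.toList 2]
  have hb : PySem.Str.count s "\\" = s.toList.count '\\' := by
    simp [PySem.Str.count]
    exact pv_count_single s.toList '\\'
  have hq : PySem.Str.count s "\"" = s.toList.count '"' := by
    simp [PySem.Str.count]
    exact pv_count_single s.toList '"'
  rw [hb, hq]
  ring
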